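-- pv_equiv track=rewrite | github.com/AlwinJoY007/kisanmitra_live_mandi_schemes | app.py | apply_filters_to_data
-- ===== SOURCE A (Python) =====
-- def apply_filters_to_data(data, state_filter, district_filter, commodity_filter):
--     """Apply filters to price data"""
--     if not data:
--         return []
--
--     filtered_data = data
--
--     # Apply state filter
--     if state_filter:
--         filtered_data = [item for item in filtered_data if item.get('state', '').lower() == state_filter.lower()]
--
--     # Apply district filter
--     if district_filter:
--         filtered_data = [item for item in filtered_data if item.get('district', '').lower() == district_filter.lower()]
--
--     # Apply commodity filter
--     if commodity_filter:
--         filtered_data = [item for item in filtered_data if item.get('name', '').lower() == commodity_filter.lower()]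
--
--     return filtered_data
-- ===== SOURCE B (Python) =====
-- def apply_filters_to_data(data, state_filter, district_filter, commodity_filter):
--     """Apply filters to price data (single combined pass)"""
--     if not data:
--         return []
--     sf = state_filter.lower() if state_filter else None
--     df = district_filter.lower() if district_filter else None
--     cf = commodity_filter.lower() if commodity_filter else None
--     result = []
--     for item in data:
--         if sf is not None and item.get('state', '').lower() != sf:
--             continue
--         if df is not None and item.get('district', '').lower() != df:
--             continue
--         if cf is not None and item.get('name', '').lower() != cf:
--             continue
--         result.append(item)
--     return result
-- ===== Notes on version B (the rewrite author's own statement) =====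
-- stated objective: faster
-- what changed: Replaces up to three sequential list-comprehension passes (each rebuilding the whole list and re-lowering the filter string for every item) with lowering each filter string once and a single accumulator loop that applies all active predicates with early skip.
import Mathlib
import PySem

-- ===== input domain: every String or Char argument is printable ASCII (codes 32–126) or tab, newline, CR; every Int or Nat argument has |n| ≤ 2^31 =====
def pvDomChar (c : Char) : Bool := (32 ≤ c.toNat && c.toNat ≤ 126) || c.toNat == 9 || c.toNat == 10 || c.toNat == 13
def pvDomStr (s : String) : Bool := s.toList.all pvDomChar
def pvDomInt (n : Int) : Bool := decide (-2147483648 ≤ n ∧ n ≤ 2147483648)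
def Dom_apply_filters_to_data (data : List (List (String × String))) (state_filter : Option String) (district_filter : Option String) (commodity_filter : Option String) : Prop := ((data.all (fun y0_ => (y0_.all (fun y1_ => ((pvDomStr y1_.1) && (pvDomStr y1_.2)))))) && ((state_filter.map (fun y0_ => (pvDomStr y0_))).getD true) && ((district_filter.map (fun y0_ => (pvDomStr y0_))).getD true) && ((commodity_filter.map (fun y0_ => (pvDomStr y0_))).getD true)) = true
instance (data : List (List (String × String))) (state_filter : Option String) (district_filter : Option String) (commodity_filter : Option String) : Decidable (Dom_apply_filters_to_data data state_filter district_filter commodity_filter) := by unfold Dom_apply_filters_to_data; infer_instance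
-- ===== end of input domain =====

-- B replaces A's up-to-three sequential filtering passes by lowering each filter string once
-- and one combined accumulator pass (measured faster in a timing run); return value proved equal.

-- item.get(key, '') on the association-list item (first match, '' if absent); shared by both ports
def pvGet (it : List (String × String)) (k : String) : String :=
  ((it.find? (fun p => p.1 == k)).map (fun p => p.2)).getD ""

-- ===== PORT A =====
def apply_filters_to_data (data : List (List (String × String))) (state_filter : Option String) (district_filter : Option String) (commodity_filter : Option String) : List (List (String × String)) :=
  if data = [] then []
  else
    let fd := data
    let fd := match state_filter with
      | some s => if s ≠ "" then fd.filter (fun it => PySem.Str.lower (pvGet it "state") == PySem.Str.lower s) else fd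
      | none => fd
    let fd := match district_filter with
      | some s => if s ≠ "" then fd.filter (fun it => PySem.Str.lower (pvGet it "district") == PySem.Str.lower s) else fd
      | none => fd
    let fd := match commodity_filter with
      | some s => if s ≠ "" then fd.filter (fun it => PySem.Str.lower (pvGet it "name") == PySem.Str.lower s) else fd
      | none => fd
    fd

-- ===== PORT B =====
-- 'x.lower() if x else None': lower the active filter strings once
def pvLowTarget : Option String → Option String
  | some s => if s = "" then none else some (PySem.Str.lower s)
  | none => none

-- the single accumulator loop of B ('continue' = skip to the recursive call)
def pvScan (sf df cf : Option String) : List (List (String × String)) → List (List (String × String))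
  | [] => []
  | it :: rest =>
    if sf.elim false (fun t => PySem.Str.lower (pvGet it "state") != t) then pvScan sf df cf rest
    else if df.elim false (fun t => PySem.Str.lower (pvGet it "district") != t) then pvScan sf df cf rest
    else if cf.elim false (fun t => PySem.Str.lower (pvGet it "name") != t) then pvScan sf df cf rest
    else it :: pvScan sf df cf rest

def apply_filters_to_data_alt (data : List (List (String × String))) (state_filter : Option String) (district_filter : Option String) (commodity_filter : Option String) : List (List (String × String)) :=
  if data = [] then []
  else pvScan (pvLowTarget state_filter) (pvLowTarget district_filter) (pvLowTarget commodity_filter) data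

-- ===== PRECONDITION & SPEC =====
def Spec_apply_filters_to_data (data : List (List (String × String))) (state_filter : Option String) (district_filter : Option String) (commodity_filter : Option String) (out : List (List (String × String))) : Prop := out = apply_filters_to_data_alt data state_filter district_filter commodity_filter
instance (data : List (List (String × String))) (state_filter : Option String) (district_filter : Option String) (commodity_filter : Option String) (out : List (List (String × String))) : Decidable (Spec_apply_filters_to_data data state_filter district_filter commodity_filter out) := by unfold Spec_apply_filters_to_data; infer_instance

-- ===== CLAIM (what is proved, stated in full; the proofs are below) =====
def Claim_equal_apply_filters_to_data : Prop := ∀ (data : List (List (String × String))) (state_filter : Option String) (district_filter : Option String) (commodity_filter : Option String), Dom_apply_filters_to_data data state_filter district_filter commodity_filter → Spec_apply_filters_to_data data state_filter district_filter commodity_filter (apply_filters_to_data data state_filter district_filter commodity_filter)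

-- ===== LEMMAS AND PROOFS =====

-- the combined keep-predicate of B's loop
def pvKeep (sf df cf : Option String) (it : List (String × String)) : Bool :=
  !(sf.elim false (fun t => PySem.Str.lower (pvGet it "state") != t)) &&
  (!(df.elim false (fun t => PySem.Str.lower (pvGet it "district") != t)) &&
   !(cf.elim false (fun t => PySem.Str.lower (pvGet it "name") != t)))

theorem pvScan_eq_filter (sf df cf : Option String) (xs : List (List (String × String))) :
    pvScan sf df cf xs = xs.filter (pvKeep sf df cf) := by
  induction xs with
  | nil => rfl
  | cons it rest ih =>
    simp only [pvScan, List.filter_cons, pvKeep]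
    split_ifs <;> simp_all

-- one filtering stage of A equals filtering by the corresponding lowered-target skip test
theorem pvStage_eq (o : Option String) (key : String) (xs : List (List (String × String))) :
    (match o with
      | some s => if s ≠ "" then xs.filter (fun it => PySem.Str.lower (pvGet it key) == PySem.Str.lower s) else xs
      | none => xs)
    = xs.filter (fun it => !((pvLowTarget o).elim false (fun t => PySem.Str.lower (pvGet it key) != t))) := by
  cases o with
  | none => simp [pvLowTarget]
  | some s =>
    by_cases h : s = "" <;> simp [pvLowTarget, h, bne]

-- ===== VERDICT (by name: the statement is the Claim_ definition above) =====
theorem apply_filters_to_data_spec : Claim_equal_apply_filters_to_data := by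
  intro data sf df cf _
  unfold Spec_apply_filters_to_data apply_filters_to_data apply_filters_to_data_alt
  by_cases hd : data = []
  · simp [hd]
  · simp only [hd, ite_false]
    rw [pvScan_eq_filter, pvStage_eq, pvStage_eq, pvStage_eq]
    simp only [List.filter_filter]
    apply List.filter_congr
    intro a _
    simp only [pvKeep]
    cases hs : (pvLowTarget sf).elim false (fun t => PySem.Str.lower (pvGet a "state") != t) <;>
      cases hd2 : (pvLowTarget df).elim false (fun t => PySem.Str.lower (pvGet a "district") != t) <;>
        cases hc : (pvLowTarget cf).elim false (fun t => PySem.Str.lower (pvGet a "name") != t) <;>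
          simp
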